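-- pv_equiv track=rewrite | github.com/NA7RAWY/Sudoku-Project | sudoku_solver_gui.py | get_valid_inputs
-- ===== SOURCE A (Python) =====
-- def get_valid_inputs(grid_size):
--     """Return valid inputs for the grid size."""
--     if grid_size == 4:
--         return [str(i) for i in range(1, 5)]  # 1 to 4
--     elif grid_size == 6:
--         return [str(i) for i in range(1, 7)]  # 1 to 6
--     elif grid_size == 9:
--         return [str(i) for i in range(1, 10)]  # 1 to 9
--     elif grid_size == 16:
--         # 1-9 and A-F for 16x16 grids
--         return [str(i) for i in range(1, 10)] + [chr(i) for i in range(ord('A'), ord('G') + 1)]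
--     else:
--         return []  # Empty for unsupported sizes
-- ===== SOURCE B (Python) =====
-- SYMBOLS = "123456789ABCDEFG"
--
-- def get_valid_inputs(grid_size):
--     """Return valid inputs for the grid size."""
--     if grid_size in (4, 6, 9, 16):
--         return list(SYMBOLS[:grid_size])
--     return []
-- ===== Notes on version B (the rewrite author's own statement) =====
-- stated objective: idiomatic
-- what changed: Replaced the four per-size list-building branches (str(i)/chr(i) comprehensions) with a single guarded prefix slice of one symbol table string '123456789ABCDEFG'.
import Mathlib
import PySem

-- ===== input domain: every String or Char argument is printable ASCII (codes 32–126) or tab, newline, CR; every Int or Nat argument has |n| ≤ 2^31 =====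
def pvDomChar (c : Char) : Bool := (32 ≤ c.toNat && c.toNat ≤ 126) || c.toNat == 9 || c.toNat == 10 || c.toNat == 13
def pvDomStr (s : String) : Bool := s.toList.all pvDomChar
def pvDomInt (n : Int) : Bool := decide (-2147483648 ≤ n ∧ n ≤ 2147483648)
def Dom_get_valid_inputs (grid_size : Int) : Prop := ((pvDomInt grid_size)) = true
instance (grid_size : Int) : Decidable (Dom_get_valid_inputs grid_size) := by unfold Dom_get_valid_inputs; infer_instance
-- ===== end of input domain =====

-- B replaces the four per-size list-building branches with a guarded prefix slice of one symbol table (idiomatic, same behaviour).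


-- ===== PORT A =====
def get_valid_inputs (grid_size : Int) : List String :=
  if grid_size == 4 then
    (PySem.List.pyRange 1 5 1).map PySem.Int.toStr
  else if grid_size == 6 then
    (PySem.List.pyRange 1 7 1).map PySem.Int.toStr
  else if grid_size == 9 then
    (PySem.List.pyRange 1 10 1).map PySem.Int.toStr
  else if grid_size == 16 then
    (PySem.List.pyRange 1 10 1).map PySem.Int.toStr
      ++ (PySem.List.pyRange 65 72 1).map (fun i => String.mk [Char.ofNat i.toNat])
  else
    []

-- ===== PORT B =====
-- B: one symbol table, guarded prefix slice (a nonnegative stop slice is List.take)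
def pvSymbols : List Char := "123456789ABCDEFG".toList

def get_valid_inputs_alt (grid_size : Int) : List String :=
  if grid_size == 4 || grid_size == 6 || grid_size == 9 || grid_size == 16 then
    (pvSymbols.take grid_size.toNat).map (fun c => String.mk [c])
  else
    []

-- ===== PRECONDITION & SPEC =====
def Spec_get_valid_inputs (grid_size : Int) (out : List String) : Prop := out = get_valid_inputs_alt grid_size
instance (grid_size : Int) (out : List String) : Decidable (Spec_get_valid_inputs grid_size out) := by unfold Spec_get_valid_inputs; infer_instance

-- ===== CLAIM (what is proved, stated in full; the proofs are below) =====
def Claim_equal_get_valid_inputs : Prop := ∀ (grid_size : Int), Dom_get_valid_inputs grid_size → Spec_get_valid_inputs grid_size (get_valid_inputs grid_size)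

-- ===== LEMMAS AND PROOFS =====

-- ===== VERDICT (by name: the statement is the Claim_ definition above) =====
theorem get_valid_inputs_spec : Claim_equal_get_valid_inputs := by
  intro g _
  unfold Spec_get_valid_inputs
  by_cases h4 : g = 4
  · subst h4; decide
  · by_cases h6 : g = 6
    · subst h6; decide
    · by_cases h9 : g = 9
      · subst h9; decide
      · by_cases h16 : g = 16
        · subst h16; decide
        · simp [get_valid_inputs, get_valid_inputs_alt, h4, h6, h9, h16]
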